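-- pv_equiv track=rewrite | github.com/Miguel-RSaa/Fund_Computaci-n | Taller 3/Punto_12.py | matriz_borde_unos
-- ===== SOURCE A (Python) =====
-- def matriz_borde_unos(n):
--     # Creamos una matriz `n x n` inicializada con ceros
--     matriz = [[0 for _ in range(n)] for _ in range(n)]
--
--     # Llenamos los bordes con unos
--     for i in range(n):
--         matriz[0][i] = 1  # Borde superior
--         matriz[n-1][i] = 1  # Borde inferior
--         matriz[i][0] = 1  # Borde izquierdo
--         matriz[i][n-1] = 1  # Borde derecho
--
--     return matriz
-- ===== SOURCE B (Python) =====
-- def matriz_borde_unos(n):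
--     # Single pass: each cell decides its own value from its coordinates.
--     return [[1 if i == 0 or i == n - 1 or j == 0 or j == n - 1 else 0
--              for j in range(n)]
--             for i in range(n)]
-- ===== Notes on version B (the rewrite author's own statement) =====
-- stated objective: simpler
-- what changed: Replaces A's allocate-zeros-then-overwrite-the-four-border-lines mutation with a single nested comprehension where each cell computes its own value from its coordinates.
import Mathlib
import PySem

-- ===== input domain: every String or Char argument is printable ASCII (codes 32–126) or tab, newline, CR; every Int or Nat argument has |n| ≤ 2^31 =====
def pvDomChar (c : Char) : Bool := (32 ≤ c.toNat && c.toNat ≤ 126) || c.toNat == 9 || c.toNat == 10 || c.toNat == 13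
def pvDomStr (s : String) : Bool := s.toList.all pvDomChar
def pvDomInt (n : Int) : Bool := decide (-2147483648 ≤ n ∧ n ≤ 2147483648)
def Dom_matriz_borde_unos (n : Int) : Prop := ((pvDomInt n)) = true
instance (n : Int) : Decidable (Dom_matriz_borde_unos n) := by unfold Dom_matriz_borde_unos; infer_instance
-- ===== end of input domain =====

-- B replaces A's allocate-zeros-then-overwrite-the-border mutation by a single
-- nested comprehension where each cell computes its value from its coordinates (objective: simpler).

-- ===== PORT A =====
-- matriz[r][c] = 1  (exact here: whenever the loop body runs, n ≥ 1 and all four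
-- indices 0, n-1, i are nonnegative and in range, so Python never raises)
def pvSetCell (m : List (List Int)) (r c : Int) : List (List Int) :=
  PySem.List.pySetD m r (PySem.List.pySetD (PySem.List.pyGetD m r []) c 1)

def matriz_borde_unos (n : Int) : List (List Int) :=
  let matriz := (PySem.List.pyRange 0 n).map (fun _ => (PySem.List.pyRange 0 n).map (fun _ => (0 : Int)))
  (PySem.List.pyRange 0 n).foldl
    (fun m i =>
      let m := pvSetCell m 0 i        -- matriz[0][i] = 1
      let m := pvSetCell m (n-1) i    -- matriz[n-1][i] = 1
      let m := pvSetCell m i 0        -- matriz[i][0] = 1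
      pvSetCell m i (n-1))            -- matriz[i][n-1] = 1
    matriz

-- ===== PORT B =====
def matriz_borde_unos_alt (n : Int) : List (List Int) :=
  (PySem.List.pyRange 0 n).map (fun i =>
    (PySem.List.pyRange 0 n).map (fun j =>
      if i = 0 ∨ i = n - 1 ∨ j = 0 ∨ j = n - 1 then (1 : Int) else 0))

-- ===== PRECONDITION & SPEC =====
def Spec_matriz_borde_unos (n : Int) (out : List (List Int)) : Prop := out = matriz_borde_unos_alt n
instance (n : Int) (out : List (List Int)) : Decidable (Spec_matriz_borde_unos n out) := by unfold Spec_matriz_borde_unos; infer_instance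

-- ===== CLAIM (what is proved, stated in full; the proofs are below) =====
def Claim_equal_matriz_borde_unos : Prop := ∀ (n : Int), Dom_matriz_borde_unos n → Spec_matriz_borde_unos n (matriz_borde_unos n)

-- ===== LEMMAS AND PROOFS =====

-- explicit N×N matrix given by an entry function
def pvM (N : Nat) (g : Nat → Nat → Int) : List (List Int) :=
  (List.range N).map (fun x => (List.range N).map (fun y => g x y))

-- entries of the matrix after the first k iterations of A's loop
def pvT (N k x y : Nat) : Int :=
  if ((x = 0 ∨ x = N - 1) ∧ y < k) ∨ ((y = 0 ∨ y = N - 1) ∧ x < k) then 1 else 0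

theorem pvSetMapRange {α : Type} (N r : Nat) (v : α) (f : Nat → α) :
    ((List.range N).map f).set r v = (List.range N).map (fun x => if x = r then v else f x) := by
  apply List.ext_getElem
  · simp
  intro j h1 h2
  simp only [List.getElem_set, List.getElem_map, List.getElem_range]
  split_ifs <;> first | rfl | omega

theorem pvGetDMapRange {α : Type} (N k : Nat) (d : α) (f : Nat → α) (h : k < N) :
    ((List.range N).map f).getD k d = f k := by
  simp [List.getD, h]

theorem pvM_congr (N : Nat) (g h : Nat → Nat → Int)
    (H : ∀ x < N, ∀ y < N, g x y = h x y) : pvM N g = pvM N h := by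
  unfold pvM
  apply List.map_congr_left
  intro x hx
  apply List.map_congr_left
  intro y hy
  exact H x (List.mem_range.mp hx) y (List.mem_range.mp hy)

theorem pvSetCell_map (N : Nat) (g : Nat → Nat → Int) (r c : Int)
    (h0 : 0 ≤ r) (hr : r.toNat < N) (hc : 0 ≤ c) :
    pvSetCell (pvM N g) r c
      = pvM N (fun x y => if x = r.toNat ∧ y = c.toNat then 1 else g x y) := by
  unfold pvSetCell pvM
  rw [PySem.List.pyGetD_of_nonneg _ _ h0, PySem.List.pySetD_of_nonneg _ _ hc,
    PySem.List.pySetD_of_nonneg _ _ h0]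
  rw [pvGetDMapRange N r.toNat _ _ hr, pvSetMapRange, pvSetMapRange]
  apply List.map_congr_left
  intro x hx
  by_cases hxr : x = r.toNat
  · subst hxr
    simp only [true_and]
    apply List.map_congr_left
    intro y _
    rfl
  · simp [hxr]

-- the loop step, with n already written as ↑N
def pvStep (N : Nat) (m : List (List Int)) (i : Int) : List (List Int) :=
  pvSetCell (pvSetCell (pvSetCell (pvSetCell m 0 i) ((N : Int) - 1) i) i 0) i ((N : Int) - 1)

theorem pvStep_map (N : Nat) (hN : 0 < N) (g : Nat → Nat → Int) (k : Nat) (hk : k < N) :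
    pvStep N (pvM N g) (k : Int)
      = pvM N (fun x y =>
          if x = k ∧ y = N - 1 then 1 else
          if x = k ∧ y = 0 then 1 else
          if x = N - 1 ∧ y = k then 1 else
          if x = 0 ∧ y = k then 1 else g x y) := by
  unfold pvStep
  have h1 : ((N : Int) - 1).toNat = N - 1 := by omega
  have h2 : ((k : Int)).toNat = k := by omega
  have h3 : (0 : Int) ≤ (N : Int) - 1 := by omega
  have h4 : (0 : Int) ≤ (k : Int) := by omega
  rw [pvSetCell_map N g 0 (k : Int) (by omega) (by omega) h4]
  rw [pvSetCell_map N _ ((N : Int) - 1) (k : Int) h3 (by omega) h4]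
  rw [pvSetCell_map N _ (k : Int) 0 h4 (by omega) (by omega)]
  rw [pvSetCell_map N _ (k : Int) ((N : Int) - 1) h4 (by omega) h3]
  simp only [h1, h2, Int.toNat_zero]

theorem pvInvariant (N : Nat) (hN : 0 < N) :
    ∀ k, k ≤ N →
      (List.range k).foldl (fun m (j : Nat) => pvStep N m (j : Int)) (pvM N (fun _ _ => 0))
        = pvM N (pvT N k) := by
  intro k
  induction k with
  | zero =>
    intro _
    apply pvM_congr
    intro x _ y _
    simp [pvT]
  | succ k ih =>
    intro hk
    rw [List.range_succ, List.foldl_append, ih (by omega)]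
    simp only [List.foldl_cons, List.foldl_nil]
    rw [pvStep_map N hN (pvT N k) k (by omega)]
    apply pvM_congr
    intro x hx y hy
    simp only [pvT]
    split_ifs <;> omega

theorem matriz_borde_unos_eq_pvM (n : Int) (hn : 0 < n) :
    matriz_borde_unos n = pvM n.toNat (pvT n.toNat n.toNat) := by
  have hNn : n = ((n.toNat : Nat) : Int) := by omega
  unfold matriz_borde_unos
  conv_lhs => rw [hNn]
  rw [PySem.List.pyRange_zero_natCast, List.foldl_map]
  simp only [List.map_map]
  exact pvInvariant n.toNat (by omega) n.toNat (le_refl _)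

theorem matriz_borde_unos_alt_eq_pvM (n : Int) (hn : 0 < n) :
    matriz_borde_unos_alt n
      = pvM n.toNat (fun x y =>
          if (x : Int) = 0 ∨ (x : Int) = ((n.toNat : Nat) : Int) - 1
             ∨ (y : Int) = 0 ∨ (y : Int) = ((n.toNat : Nat) : Int) - 1
          then 1 else 0) := by
  have hNn : n = ((n.toNat : Nat) : Int) := by omega
  unfold matriz_borde_unos_alt pvM
  conv_lhs => rw [hNn]
  rw [PySem.List.pyRange_zero_natCast]
  simp only [List.map_map]
  rfl

-- ===== VERDICT (by name: the statement is the Claim_ definition above) =====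
theorem matriz_borde_unos_spec : Claim_equal_matriz_borde_unos := by
  intro n _
  unfold Spec_matriz_borde_unos
  by_cases hn : 0 < n
  · rw [matriz_borde_unos_eq_pvM n hn, matriz_borde_unos_alt_eq_pvM n hn]
    apply pvM_congr
    intro x hx y hy
    simp only [pvT]
    split_ifs <;> omega
  · have hnil : PySem.List.pyRange 0 n = [] := PySem.List.pyRange_one_eq_nil (by omega)
    simp [matriz_borde_unos, matriz_borde_unos_alt, hnil]
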